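-- pv_equiv track=rewrite | github.com/AashishUpadhyay/SkinThePython | src/hierholzersalgorithm.py | _build_vertices
-- ===== SOURCE A (Python) =====
-- def _build_vertices(arr: [], node_char_count: int, cnt_index: int = 0):
--     result = []
--
--     if cnt_index >= node_char_count:
--         return result
--
--     for i in arr:
--         returned_val = _build_vertices(arr, node_char_count, cnt_index + 1)
--
--         if len(returned_val):
--             result.extend([i + val for val in returned_val])
--         else:
--             result.append(i)
--
--     return result
-- ===== SOURCE B (Python) =====
-- def _build_vertices(arr: [], node_char_count: int, cnt_index: int = 0):
--     k = node_char_count - cnt_index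
--     if k <= 0 or not arr:
--         return []
--     acc = list(arr)
--     for _ in range(k - 1):
--         acc = [i + v for i in arr for v in acc]
--     return acc
-- ===== Notes on version B (the rewrite author's own statement) =====
-- stated objective: alternative
-- what changed: Replaced the recursion that rebuilds the whole (k-1)-level product once per array element with a single iterative bottom-up cartesian-product build (one list per level), avoiding the redundant recomputation.
-- outside the precondition, e.g. on _build_vertices([''], 901, 0): A returns [''], B returns ['']
import Mathlib
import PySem

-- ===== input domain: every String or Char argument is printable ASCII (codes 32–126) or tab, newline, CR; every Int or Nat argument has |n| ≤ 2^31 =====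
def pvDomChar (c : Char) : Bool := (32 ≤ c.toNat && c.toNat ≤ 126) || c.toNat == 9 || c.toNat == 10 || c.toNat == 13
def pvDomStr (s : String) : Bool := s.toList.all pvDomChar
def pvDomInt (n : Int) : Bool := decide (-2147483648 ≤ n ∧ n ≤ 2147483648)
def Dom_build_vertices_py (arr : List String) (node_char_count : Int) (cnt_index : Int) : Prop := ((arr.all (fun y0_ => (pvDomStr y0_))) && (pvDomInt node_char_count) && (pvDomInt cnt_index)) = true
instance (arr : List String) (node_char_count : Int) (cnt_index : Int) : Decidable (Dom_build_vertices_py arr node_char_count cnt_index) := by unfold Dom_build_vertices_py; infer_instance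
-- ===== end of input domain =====

-- B replaces A's recursion (which rebuilds the whole deeper product once per element) by a
-- single iterative bottom-up cartesian-product build, avoiding the redundant recomputation.

-- ===== PORT A =====
def build_vertices_py (arr : List String) (node_char_count : Int) (cnt_index : Int) : List String :=
  if cnt_index ≥ node_char_count then []
  else
    arr.foldl (fun result i =>
      let returned_val := build_vertices_py arr node_char_count (cnt_index + 1)
      if returned_val.length ≠ 0 then
        result ++ returned_val.map (fun val => i ++ val)
      else
        result ++ [i]) []
termination_by (node_char_count - cnt_index).toNat
decreasing_by omega

-- ===== PORT B =====
def build_vertices_py_alt (arr : List String) (node_char_count : Int) (cnt_index : Int) : List String :=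
  let k := node_char_count - cnt_index
  if k ≤ 0 ∨ arr = [] then []
  else
    (List.range (k - 1).toNat).foldl
      (fun acc _ => arr.flatMap (fun i => acc.map (fun v => i ++ v))) arr

-- ===== PRECONDITION & SPEC =====
-- Pre_ excludes calls that recurse more than 900 levels (arr nonempty and node_char_count -
-- cnt_index > 900): around CPython's default recursion limit A raises RecursionError; the exact
-- limit is environment-dependent, so a narrow band just below it where A still returns is
-- excluded too.
def Pre_build_vertices_py (arr : List String) (node_char_count : Int) (cnt_index : Int) : Prop :=
  arr = [] ∨ node_char_count - cnt_index ≤ 900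
instance (arr : List String) (node_char_count : Int) (cnt_index : Int) : Decidable (Pre_build_vertices_py arr node_char_count cnt_index) := by unfold Pre_build_vertices_py; infer_instance
def pvWitness_build_vertices_py : List String × Int × Int := (["ab", "c"], 2, 0)

def Spec_build_vertices_py (arr : List String) (node_char_count : Int) (cnt_index : Int) (out : List String) : Prop := out = build_vertices_py_alt arr node_char_count cnt_index
instance (arr : List String) (node_char_count : Int) (cnt_index : Int) (out : List String) : Decidable (Spec_build_vertices_py arr node_char_count cnt_index out) := by unfold Spec_build_vertices_py; infer_instance

-- ===== CLAIM (what is proved, stated in full; the proofs are below) =====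
def Claim_equal_build_vertices_py : Prop := ∀ (arr : List String) (node_char_count : Int) (cnt_index : Int), Dom_build_vertices_py arr node_char_count cnt_index → Pre_build_vertices_py arr node_char_count cnt_index → Spec_build_vertices_py arr node_char_count cnt_index (build_vertices_py arr node_char_count cnt_index)

-- ===== LEMMAS AND PROOFS =====

-- one level of B's iterative build
def pvStep (arr acc : List String) : List String :=
  arr.flatMap (fun i => acc.map (fun v => i ++ v))

lemma pvStep_ne_nil (arr acc : List String) (ha : arr ≠ []) (hb : acc ≠ []) :
    pvStep arr acc ≠ [] := by
  cases arr with
  | nil => exact absurd rfl ha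
  | cons x xs =>
    cases acc with
    | nil => exact absurd rfl hb
    | cons y ys => simp [pvStep]

-- B's accumulator after j iterations
def pvIter (arr : List String) (j : Nat) : List String :=
  (List.range j).foldl (fun acc _ => pvStep arr acc) arr

lemma pvIter_succ (arr : List String) (j : Nat) :
    pvIter arr (j + 1) = pvStep arr (pvIter arr j) := by
  simp [pvIter, List.range_succ]

lemma pvIter_ne_nil (arr : List String) (j : Nat) (ha : arr ≠ []) :
    pvIter arr j ≠ [] := by
  induction j with
  | zero => simpa [pvIter]
  | succ j ih => rw [pvIter_succ]; exact pvStep_ne_nil arr _ ha ih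

lemma alt_eq_iter (arr : List String) (n c : Int) (ha : arr ≠ []) (hc : c < n) :
    build_vertices_py_alt arr n c = pvIter arr (n - c - 1).toNat := by
  have h1 : ¬ (n - c ≤ 0 ∨ arr = []) :=
    fun h => h.elim (fun h2 => by omega) ha
  simp only [build_vertices_py_alt, if_neg h1, pvIter, pvStep]

-- unfold one level of A into a flatMap
lemma A_unfold (arr : List String) (n c : Int) (hc : c < n) :
    build_vertices_py arr n c =
      arr.flatMap (fun i =>
        let r := build_vertices_py arr n (c + 1)
        if r.length ≠ 0 then r.map (fun val => i ++ val) else [i]) := by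
  rw [build_vertices_py]
  rw [if_neg (by omega)]
  have := PySem.List.foldl_append_eq_flatMap
    (l := arr) (acc := ([] : List String))
    (g := fun i =>
      let r := build_vertices_py arr n (c + 1)
      if r.length ≠ 0 then r.map (fun val => i ++ val) else [i])
  simp only [List.nil_append] at this
  rw [← this]
  congr 1
  funext result i
  by_cases h : (build_vertices_py arr n (c + 1)).length ≠ 0 <;> simp [h]

lemma A_eq_iter (m : Nat) : ∀ (arr : List String) (n c : Int), arr ≠ [] →
    (n - c).toNat = m → 0 < m →
    build_vertices_py arr n c = pvIter arr (m - 1) := by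
  induction m with
  | zero => intro _ _ _ _ _ h; omega
  | succ m ih =>
    intro arr n c ha hm _
    have hc : c < n := by omega
    rw [A_unfold arr n c hc]
    by_cases h0 : m = 0
    · -- deepest level: recursive call returns []
      subst h0
      have hr : build_vertices_py arr n (c + 1) = [] := by
        rw [build_vertices_py, if_pos (by omega)]
      simp [hr, pvIter, List.flatMap]
      exact List.flatMap_singleton' arr
    · have hr : build_vertices_py arr n (c + 1) = pvIter arr (m - 1) :=
        ih arr n (c + 1) ha (by omega) (by omega)
      have hne : pvIter arr (m - 1) ≠ [] := pvIter_ne_nil arr (m - 1) ha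
      have hlen : (build_vertices_py arr n (c + 1)).length ≠ 0 := by
        rw [hr]; simpa using hne
      have hstep : m - 1 + 1 = (m + 1) - 1 := by omega
      simp only [hr]
      have hlen' : (pvIter arr (m - 1)).length ≠ 0 := by simpa using hne
      simp only [ne_eq, hlen', not_false_eq_true, if_true]
      rw [← hstep, pvIter_succ, pvStep]

lemma A_nil (n c : Int) : build_vertices_py [] n c = [] := by
  rw [build_vertices_py]
  split <;> simp

-- ===== VERDICT (by name: the statement is the Claim_ definition above) =====
theorem build_vertices_py_spec : Claim_equal_build_vertices_py := by
  intro arr n c _ _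
  unfold Spec_build_vertices_py
  by_cases ha : arr = []
  · subst ha
    rw [A_nil]
    simp [build_vertices_py_alt]
  · by_cases hc : c < n
    · rw [alt_eq_iter arr n c ha hc,
        A_eq_iter (n - c).toNat arr n c ha rfl (by omega)]
      congr 1
      omega
    · rw [build_vertices_py, if_pos (by omega)]
      simp [build_vertices_py_alt, ha]
      omega
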